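-- pv_equiv track=rewrite | github.com/chaki1997/techjobs | profile_wizard/form_wizard_dict.py | sort_forms_data
-- ===== SOURCE A (Python) =====
-- def sort_forms_data(form_list):
--     form_dict = {}
--     form1=[]
--     form2=[]
--     form3=[]
--     for form in form_list:
--
--         if 'prof_title' in form.keys():
--             form1.append(form)
--             form_dict['form1']=form1
--         elif 'school' in form.keys():
--             form2.append(form)
--             form_dict['form2']=form2
--         elif 'language_compatancy' in form.keys():
--             form3.append(form)
--             form_dict['form3']=form3
--     #form_dict['form1':form1,'form2':form2,'form3':form3]
--     return form_dict
-- ===== SOURCE B (Python) =====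
-- def sort_forms_data(form_list):
--     table = (('prof_title', 'form1'), ('school', 'form2'), ('language_compatancy', 'form3'))
--     labeled = [(next((lbl for key, lbl in table if key in form), None), form)
--                for form in form_list]
--     order = []
--     for lbl, _ in labeled:
--         if lbl is not None and lbl not in order:
--             order.append(lbl)
--     return {lbl: [f for l, f in labeled if l == lbl] for lbl in order}
-- ===== Notes on version B (the rewrite author's own statement) =====
-- stated objective: idiomatic
-- what changed: Replaces the if/elif chain with three mutable bucket lists and in-loop dict writes by a data-driven pipeline: a dispatch table labels each form (first matching key), a first-occurrence order list is computed, and the result dict is built once by a group-by comprehension.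
import Mathlib
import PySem

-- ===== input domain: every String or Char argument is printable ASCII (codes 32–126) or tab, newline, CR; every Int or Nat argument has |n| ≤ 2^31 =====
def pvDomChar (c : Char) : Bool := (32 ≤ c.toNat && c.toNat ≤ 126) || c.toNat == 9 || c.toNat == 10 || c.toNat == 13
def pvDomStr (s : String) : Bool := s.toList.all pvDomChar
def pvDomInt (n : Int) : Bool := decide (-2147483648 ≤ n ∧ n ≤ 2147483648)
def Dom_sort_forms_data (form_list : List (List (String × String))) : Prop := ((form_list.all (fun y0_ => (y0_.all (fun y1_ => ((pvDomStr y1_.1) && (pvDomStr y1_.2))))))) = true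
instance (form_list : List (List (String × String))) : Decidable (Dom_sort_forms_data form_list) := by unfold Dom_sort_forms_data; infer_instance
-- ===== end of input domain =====

-- B replaces A's if/elif chain with mutable buckets by a table-driven label → group-by pipeline (idiomatic; same cost).

-- ===== PORT A =====
-- A's loop state: (form_dict, form1, form2, form3); 'k in form.keys()' is first-match key membership.
def pvStepA (st : PySem.Dict String (List (List (String × String))) × List (List (String × String)) × List (List (String × String)) × List (List (String × String))) (form : List (String × String)) : PySem.Dict String (List (List (String × String))) × List (List (String × String)) × List (List (String × String)) × List (List (String × String)) :=
  let (d, f1, f2, f3) := st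
  if form.any (fun p => p.1 == "prof_title") then
    let f1' := f1 ++ [form]
    (d.insert "form1" f1', f1', f2, f3)
  else if form.any (fun p => p.1 == "school") then
    let f2' := f2 ++ [form]
    (d.insert "form2" f2', f1, f2', f3)
  else if form.any (fun p => p.1 == "language_compatancy") then
    let f3' := f3 ++ [form]
    (d.insert "form3" f3', f1, f2, f3')
  else (d, f1, f2, f3)

def sort_forms_data (form_list : List (List (String × String))) : List (String × List (List (String × String))) :=
  (form_list.foldl pvStepA (PySem.Dict.empty, [], [], [])).1.items

-- ===== PORT B =====
def pvTable : List (String × String) := [("prof_title", "form1"), ("school", "form2"), ("language_compatancy", "form3")]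

-- next((lbl for key, lbl in table if key in form), None)
def pvLabel (form : List (String × String)) : Option String :=
  (pvTable.find? (fun kl => form.any (fun p => p.1 == kl.1))).map (·.2)

def pvOrder (labeled : List (Option String × List (String × String))) : List String :=
  labeled.foldl (fun ord lf =>
    match lf.1 with
    | some lbl => if ord.contains lbl then ord else ord ++ [lbl]
    | none => ord) []

def sort_forms_data_alt (form_list : List (List (String × String))) : List (String × List (List (String × String))) :=
  let labeled := form_list.map (fun form => (pvLabel form, form))
  let order := pvOrder labeled
  order.map (fun lbl => (lbl, (labeled.filter (fun lf => lf.1 == some lbl)).map (·.2)))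

-- ===== PRECONDITION & SPEC =====
def Spec_sort_forms_data (form_list : List (List (String × String))) (out : List (String × List (List (String × String)))) : Prop := out = sort_forms_data_alt form_list
instance (form_list : List (List (String × String))) (out : List (String × List (List (String × String)))) : Decidable (Spec_sort_forms_data form_list out) := by unfold Spec_sort_forms_data; infer_instance

-- ===== CLAIM (what is proved, stated in full; the proofs are below) =====
def Claim_equal_sort_forms_data : Prop := ∀ (form_list : List (List (String × String))), Dom_sort_forms_data form_list → Spec_sort_forms_data form_list (sort_forms_data form_list)

-- ===== LEMMAS AND PROOFS =====

-- B's bucket for a label, as B computes it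
def pvBucket (form_list : List (List (String × String))) (lbl : String) : List (List (String × String)) :=
  ((form_list.map (fun form => (pvLabel form, form))).filter (fun lf => lf.1 == some lbl)).map (·.2)

def pvOrd (form_list : List (List (String × String))) : List String :=
  pvOrder (form_list.map (fun form => (pvLabel form, form)))

theorem pvBucket_append (l : List (List (String × String))) (x : List (String × String)) (lbl : String) :
    pvBucket (l ++ [x]) lbl = pvBucket l lbl ++ (if pvLabel x == some lbl then [x] else []) := by
  simp only [pvBucket, List.map_append, List.filter_append, List.map_append, List.map_cons]
  split_ifs with h <;> simp [List.filter, h]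

theorem pvOrd_append (l : List (List (String × String))) (x : List (String × String)) :
    pvOrd (l ++ [x]) = match pvLabel x with
      | some lbl => if (pvOrd l).contains lbl then pvOrd l else pvOrd l ++ [lbl]
      | none => pvOrd l := by
  simp [pvOrd, pvOrder, List.map_append, List.foldl_append]

-- the invariant of A's loop, phrased in B's vocabulary
-- inserting a form's bucket under its label rebuilds exactly B's items list for l ++ [x]
theorem pvInsertLem (l : List (List (String × String))) (x : List (String × String)) (lbl : String)
    (hx : pvLabel x = some lbl) :
    (PySem.Dict.mk ((pvOrd l).map (fun L => (L, pvBucket l L)))).insert lbl (pvBucket l lbl ++ [x]) =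
      PySem.Dict.mk ((pvOrd (l ++ [x])).map (fun L => (L, pvBucket (l ++ [x]) L))) := by
  apply PySem.Dict.ext
  have hord := pvOrd_append l x
  rw [hx] at hord
  by_cases hmem : lbl ∈ pvOrd l
  · have hc : (PySem.Dict.mk ((pvOrd l).map (fun L => (L, pvBucket l L)))).contains lbl = true := by
      rw [PySem.Dict.contains_eq_decide_mem_keys]; simp [hmem]
    rw [PySem.Dict.items_insert_of_contains _ _ hc]
    have hord' : pvOrd (l ++ [x]) = pvOrd l := by rw [hord]; simp [hmem]
    rw [hord']
    show ((pvOrd l).map _).map _ = _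
    rw [List.map_map]
    apply List.map_congr_left
    intro L hL
    by_cases hLl : L = lbl
    · subst hLl; simp [pvBucket_append, hx]
    · simp [pvBucket_append, hx, hLl, Ne.symm hLl]
  · have hc : (PySem.Dict.mk ((pvOrd l).map (fun L => (L, pvBucket l L)))).contains lbl = false := by
      rw [PySem.Dict.contains_eq_decide_mem_keys]; simp [hmem]
    rw [PySem.Dict.items_insert_of_not_contains _ _ hc]
    have hord' : pvOrd (l ++ [x]) = pvOrd l ++ [lbl] := by rw [hord]; simp [hmem]
    rw [hord', List.map_append]
    show ((pvOrd l).map _) ++ _ = _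
    congr 1
    · apply List.map_congr_left
      intro L hL
      have hLl : L ≠ lbl := fun h => hmem (h ▸ hL)
      simp [pvBucket_append, hx, Ne.symm hLl]
    · simp [pvBucket_append, hx]

theorem pvInv (l : List (List (String × String))) :
    l.foldl pvStepA (PySem.Dict.empty, [], [], []) =
      (PySem.Dict.mk ((pvOrd l).map (fun lbl => (lbl, pvBucket l lbl))),
       pvBucket l "form1", pvBucket l "form2", pvBucket l "form3") := by
  induction l using List.reverseRecOn with
  | nil => rfl
  | append_singleton l x ih =>
    rw [List.foldl_append, ih]
    simp only [List.foldl_cons, List.foldl_nil]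
    unfold pvStepA
    by_cases h1 : x.any (fun p => p.1 == "prof_title")
    · have hx : pvLabel x = some "form1" := by simp [pvLabel, pvTable, h1]
      simp only [h1, if_true]
      rw [pvInsertLem l x "form1" hx]
      simp [pvBucket_append, hx]
    · by_cases h2 : x.any (fun p => p.1 == "school")
      · have hx : pvLabel x = some "form2" := by simp [pvLabel, pvTable, List.find?, h1, h2]
        simp only [h1, h2, if_true, if_false, Bool.false_eq_true]
        rw [pvInsertLem l x "form2" hx]
        simp [pvBucket_append, hx]
      · by_cases h3 : x.any (fun p => p.1 == "language_compatancy")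
        · have hx : pvLabel x = some "form3" := by simp [pvLabel, pvTable, List.find?, h1, h2, h3]
          simp only [h1, h2, h3, if_true, if_false, Bool.false_eq_true]
          rw [pvInsertLem l x "form3" hx]
          simp [pvBucket_append, hx]
        · have hx : pvLabel x = none := by simp [pvLabel, pvTable, List.find?, h1, h2, h3]
          have hord : pvOrd (l ++ [x]) = pvOrd l := by rw [pvOrd_append, hx]
          simp [h1, h2, h3, hord, pvBucket_append, hx]

theorem sort_forms_data_spec : Claim_equal_sort_forms_data := by
  intro form_list _
  unfold Spec_sort_forms_data sort_forms_data sort_forms_data_alt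
  rw [pvInv]
  rfl
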